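-- pv_equiv track=rewrite | github.com/FSASFujitsuIQC/quantum-taste-perception | modules/utils.py | get_mol_per_group_in_top_k
-- ===== SOURCE A (Python) =====
-- import itertools
--
-- groups_lab=[['142218_icilin',  'CID_2758_eucalyptol',  'CID_6616_camphene',  'CID_10106_isocineole',  'CID_443162_l-alpha-terpineol',  'CID_20055523_trans-4-thujanol',  'CID_111037_alpha-terpinylacetate',  'CID_11230_terpinen-4-ol',  'CID_2537_2-bornanone',  'CID_82227_alphapinene',  'CID_440967_betapinene',  'CID_28930_alphafenchene',  'CID_527424_p-Mentha-1,5,8-triene',  'CID_91710638_beta-Z-curcumen-12-ol',  'CID_101412242_beta-Copaene-4-alpha-ol'], ['CID_1549025_cis-geranylacetate',  'CID_567757_verbenyl-ethyl-ether',  'CID_91746870_selina-1,4-diene',  'CID_10812_betacymene',  'CID_10703_o-cymene',  'CID_6432312_gamma-elemene',  'CID_94254_elixene',  'CID_10657_beta-cadinene',  'CID_11463_alpha-terpinolene',  'CID_5315347_beta-cyclogermacrane',  'CID_7462_alpha-terpinene',  'CID_261491_alpha-thujone',  'CID_6918391_beta-elemene',  'CID_442348_alpha-cedrene',  'CID_92139_alpha-curcumene',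  'CID_7461_gamma-terpinene',  'CID_28237_beta-selinene',  'CID_18818_sabinene',  'CID_17868_alphathujene',  'CID_11127403_alpha-zingiberene',  'CID_11106487_beta-sesquiphellandrene',  'CID_11106485_beta-cedrene',  'CID_442359_alpha-cubebene',  'CID_522296_Selina-3,7-11-diene',  'CID_518814_beta-cuvebene',  'CID_11401461_cis-tujopsene'], ['CID_65575_cedrol',  'CID_6549_linalool',  'CID_160799_tau-cadinol',  'CID_335_o-cresol',  'CID_240122_guaiyl-acetate',  'CID_30247_lavandulyl-acetate',  'CID_5365847_ethyl-geranyl-ether',  'CID_440917_d-limonene',  'CID_441005_delta-cadinene',  'CID_12304570_silvestrene',  'CID_68140_psilimonene',  'CID_6432308_gamma-muurolene',  'CID_53359349_sesquithujene',  'CID_102443_isoterpinolene',  'CID_5368451_cosmene',  'CID_68316_perillene',  'CID_530421_aristolene',  'CID_31289_nonanal',  'CID_28481_calarene',  'CID_12343_1,4-cyclohexadiene',  'CID_85582292_24thujadiene'], ['CID_91723677_cadina-3,5-diene',  'CID_15094_gamma-cadinene',  'CID_6429022_trans-calamenene',  'CID_7855_2-propenenitrile',  'CID_5281520_humulene',  'CID_12306048_alpha-cadinene',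  'CID_26049_3-carene',  'CID_637563_anethole',  'CID_5281515_caryophyllene',  'CID_12222_2-propynal',  '4444855_isocaryophyllene',  '4444848_beta-caryophyllene',  'CID_12302243_alpha-calarorene',  'CID_5371125_Neo-allo-ocimene']]
--
-- def get_mol_per_group_in_top_k(ranking,exp_groups=groups_lab,k=14):
--     '''
--     Get the number of molecules per group in the top k molecules.
--     Attributes:
--         - ranking: ranking of molecules
--         - exp_groups: list of groups of molecules
--         - k: number of molecules to consider
--     '''
--     unified_groups_lab=list(itertools.chain.from_iterable(exp_groups))
--     ranking = {mol:ranking[mol] for mol in ranking.keys() if mol in unified_groups_lab}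
--     top_k = list(ranking.keys())[:k]
--     top_k_groups = {}
--     for i,group in enumerate(exp_groups):
--         top_k_groups[i+1] = []
--         for mol in top_k:
--             if mol in group:
--                 top_k_groups[i+1].append(mol)
--     return top_k_groups
-- ===== SOURCE B (Python) =====
-- groups_lab=[['142218_icilin',  'CID_2758_eucalyptol',  'CID_6616_camphene',  'CID_10106_isocineole',  'CID_443162_l-alpha-terpineol',  'CID_20055523_trans-4-thujanol',  'CID_111037_alpha-terpinylacetate',  'CID_11230_terpinen-4-ol',  'CID_2537_2-bornanone',  'CID_82227_alphapinene',  'CID_440967_betapinene',  'CID_28930_alphafenchene',  'CID_527424_p-Mentha-1,5,8-triene',  'CID_91710638_beta-Z-curcumen-12-ol',  'CID_101412242_beta-Copaene-4-alpha-ol'], ['CID_1549025_cis-geranylacetate',  'CID_567757_verbenyl-ethyl-ether',  'CID_91746870_selina-1,4-diene',  'CID_10812_betacymene',  'CID_10703_o-cymene',  'CID_6432312_gamma-elemene',  'CID_94254_elixene',  'CID_10657_beta-cadinene',  'CID_11463_alpha-terpinolene',  'CID_5315347_beta-cyclogermacrane',  'CID_7462_alpha-terpinene',  'CID_261491_alpha-thujone',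  'CID_6918391_beta-elemene',  'CID_442348_alpha-cedrene',  'CID_92139_alpha-curcumene',  'CID_7461_gamma-terpinene',  'CID_28237_beta-selinene',  'CID_18818_sabinene',  'CID_17868_alphathujene',  'CID_11127403_alpha-zingiberene',  'CID_11106487_beta-sesquiphellandrene',  'CID_11106485_beta-cedrene',  'CID_442359_alpha-cubebene',  'CID_522296_Selina-3,7-11-diene',  'CID_518814_beta-cuvebene',  'CID_11401461_cis-tujopsene'], ['CID_65575_cedrol',  'CID_6549_linalool',  'CID_160799_tau-cadinol',  'CID_335_o-cresol',  'CID_240122_guaiyl-acetate',  'CID_30247_lavandulyl-acetate',  'CID_5365847_ethyl-geranyl-ether',  'CID_440917_d-limonene',  'CID_441005_delta-cadinene',  'CID_12304570_silvestrene',  'CID_68140_psilimonene',  'CID_6432308_gamma-muurolene',  'CID_53359349_sesquithujene',  'CID_102443_isoterpinolene',  'CID_5368451_cosmene',  'CID_68316_perillene',  'CID_530421_aristolene',  'CID_31289_nonanal',  'CID_28481_calarene',  'CID_12343_1,4-cyclohexadiene',  'CID_85582292_24thujadiene'], ['CID_91723677_cadina-3,5-diene',  'CID_15094_gamma-cadinene',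  'CID_6429022_trans-calamenene',  'CID_7855_2-propenenitrile',  'CID_5281520_humulene',  'CID_12306048_alpha-cadinene',  'CID_26049_3-carene',  'CID_637563_anethole',  'CID_5281515_caryophyllene',  'CID_12222_2-propynal',  '4444855_isocaryophyllene',  '4444848_beta-caryophyllene',  'CID_12302243_alpha-calarorene',  'CID_5371125_Neo-allo-ocimene']]
--
-- def get_mol_per_group_in_top_k(ranking, exp_groups=groups_lab, k=14):
--     '''Same result as A: one pass over the top-k dispatches each molecule to its groups.'''
--     where = {}
--     for i, group in enumerate(exp_groups):
--         for mol in group: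
--             ids = where.get(mol, [])
--             if (i + 1) not in ids:
--                 where[mol] = ids + [i + 1]
--     top_k_groups = {i + 1: [] for i in range(len(exp_groups))}
--     top_k = [mol for mol in ranking if mol in where][:k]
--     for mol in top_k:
--         for idx in where[mol]:
--             top_k_groups[idx].append(mol)
--     return top_k_groups
-- ===== Notes on version B (the rewrite author's own statement) =====
-- stated objective: faster
-- what changed: Replaces the nested groups-by-top_k scan (with a linear 'mol in unified_groups' membership test per ranking key) by dictionaries built once: a mol-to-group-indices map and pre-initialized group lists, so each top-k molecule is dispatched to its groups in one pass with O(1) lookups.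
import Mathlib
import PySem

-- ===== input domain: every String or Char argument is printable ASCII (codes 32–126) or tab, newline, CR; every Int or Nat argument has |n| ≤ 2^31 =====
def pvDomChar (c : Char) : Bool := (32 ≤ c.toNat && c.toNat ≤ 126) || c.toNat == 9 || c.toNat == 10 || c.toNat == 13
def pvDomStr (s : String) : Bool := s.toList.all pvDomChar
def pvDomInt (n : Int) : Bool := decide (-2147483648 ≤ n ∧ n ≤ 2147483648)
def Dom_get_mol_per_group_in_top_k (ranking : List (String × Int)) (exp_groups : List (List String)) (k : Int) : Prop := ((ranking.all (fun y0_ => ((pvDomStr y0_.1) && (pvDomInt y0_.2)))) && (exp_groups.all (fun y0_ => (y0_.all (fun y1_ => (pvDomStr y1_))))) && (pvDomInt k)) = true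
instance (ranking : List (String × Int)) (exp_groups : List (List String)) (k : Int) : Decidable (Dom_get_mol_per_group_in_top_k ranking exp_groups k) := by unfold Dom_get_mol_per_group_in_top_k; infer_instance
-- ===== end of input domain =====

-- B replaces the nested groups-by-top_k scan with dictionaries built once (mol-to-group-indices dispatch); objective: faster.

-- ===== PORT A =====
def get_mol_per_group_in_top_k (ranking : List (String × Int)) (exp_groups : List (List String)) (k : Int) : List (Int × List String) :=
  let unified : List String := exp_groups.flatten
  let r0 : PySem.Dict String Int := PySem.Dict.ofList ranking
  let ranking2 : PySem.Dict String Int :=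
    r0.keys.foldl (fun d mol =>
      if unified.contains mol then d.insert mol (r0.getD mol 0) else d) PySem.Dict.empty
  let top_k : List String := PySem.List.slice ranking2.keys none (some k)
  let res : PySem.Dict Int (List String) :=
    (PySem.List.enumerate exp_groups 0).foldl (fun d p =>
      let d1 := d.insert (p.1 + 1) ([] : List String)
      top_k.foldl (fun d mol =>
        if p.2.contains mol then d.modify (p.1 + 1) [] (fun l => l ++ [mol]) else d) d1)
      PySem.Dict.empty
  res.items

-- ===== PORT B =====
def get_mol_per_group_in_top_k_alt (ranking : List (String × Int)) (exp_groups : List (List String)) (k : Int) : List (Int × List String) :=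
  let whereD : PySem.Dict String (List Int) :=
    (PySem.List.enumerate exp_groups 0).foldl (fun w p =>
      p.2.foldl (fun w mol =>
        let ids := w.getD mol []
        if ids.contains (p.1 + 1) then w else w.insert mol (ids ++ [p.1 + 1])) w)
      PySem.Dict.empty
  let tkg : PySem.Dict Int (List String) :=
    (PySem.List.pyRange 0 (exp_groups.length : Int) 1).foldl
      (fun d i => d.insert (i + 1) ([] : List String)) PySem.Dict.empty
  let top_k : List String :=
    PySem.List.slice (((PySem.Dict.ofList ranking).keys).filter (fun mol => whereD.contains mol)) none (some k)
  let res : PySem.Dict Int (List String) :=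
    top_k.foldl (fun d mol =>
      (whereD.getD mol []).foldl (fun d idx => d.modify idx [] (fun l => l ++ [mol])) d) tkg
  res.items

-- ===== PRECONDITION & SPEC =====
def Spec_get_mol_per_group_in_top_k (ranking : List (String × Int)) (exp_groups : List (List String)) (k : Int) (out : List (Int × List String)) : Prop := out = get_mol_per_group_in_top_k_alt ranking exp_groups k
instance (ranking : List (String × Int)) (exp_groups : List (List String)) (k : Int) (out : List (Int × List String)) : Decidable (Spec_get_mol_per_group_in_top_k ranking exp_groups k out) := by unfold Spec_get_mol_per_group_in_top_k; infer_instance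

-- ===== CLAIM (what is proved, stated in full; the proofs are below) =====
def Claim_equal_get_mol_per_group_in_top_k : Prop := ∀ (ranking : List (String × Int)) (exp_groups : List (List String)) (k : Int), Dom_get_mol_per_group_in_top_k ranking exp_groups k → Spec_get_mol_per_group_in_top_k ranking exp_groups k (get_mol_per_group_in_top_k ranking exp_groups k)

-- ===== LEMMAS AND PROOFS =====

/-- The list of (1-based) group indices whose group contains `m`. -/
def pvW (gs : List (List String)) (m : String) : List Int :=
  ((PySem.List.enumerate gs 0).filter (fun p => p.2.contains m)).map (fun p => p.1 + 1)

-- ---- generic fold lemmas ----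

/-- Conditional fresh-key insert loop: keys append the filtered elements. -/
theorem lem_cond_insert_keys (p : String → Bool) (v : String → Int) :
    ∀ (l : List String) (d : PySem.Dict String Int), l.Nodup →
      (∀ m ∈ l, d.contains m = false) →
      (l.foldl (fun d mol => if p mol then d.insert mol (v mol) else d) d).keys
        = d.keys ++ l.filter p := by
  intro l
  induction l with
  | nil => intro d _ _; simp
  | cons mol rest ih =>
    intro d hnd hfresh
    have hmol : d.contains mol = false := hfresh mol (by simp)
    by_cases hp : p mol
    · simp only [List.foldl_cons, hp, if_true, List.filter_cons_of_pos hp]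
      rw [ih (d.insert mol (v mol)) hnd.of_cons]
      · rw [PySem.Dict.keys_insert_of_not_contains d (v mol) hmol]
        simp
      · intro m hm
        rw [PySem.Dict.contains_insert]
        have : m ≠ mol := by
          intro h; subst h; exact (List.nodup_cons.mp hnd).1 hm
        simp [this, hfresh m (by simp [hm])]
    · simp only [List.foldl_cons, if_neg hp, List.filter_cons_of_neg hp]
      exact ih d hnd.of_cons (fun m hm => hfresh m (by simp [hm]))

/-- B's inner where-building loop, getD view. -/
theorem lem_innB_getD (j : Int) :
    ∀ (g : List String) (w : PySem.Dict String (List Int)) (m : String),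
      (g.foldl (fun w mol =>
          if (w.getD mol []).contains (j + 1) then w
          else w.insert mol (w.getD mol [] ++ [j + 1])) w).getD m []
        = if m ∈ g ∧ (j + 1) ∉ w.getD m [] then w.getD m [] ++ [j + 1] else w.getD m [] := by
  intro g
  induction g with
  | nil => intro w m; simp
  | cons mol rest ih =>
    intro w m
    by_cases hc : (w.getD mol []).contains (j + 1)
    · have hmem : (j + 1) ∈ w.getD mol [] := by simpa using hc
      simp only [List.foldl_cons, if_pos hc, ih]
      by_cases hm : m = mol
      · subst hm; simp [hmem]
      · simp [hm]
    · simp only [List.foldl_cons, if_neg hc, ih]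
      have hnm : (j + 1) ∉ w.getD mol [] := by simpa using hc
      by_cases hm : m = mol
      · subst hm
        rw [PySem.Dict.getD_insert]
        simp only [if_pos rfl]
        simp [hnm]
      · rw [PySem.Dict.getD_insert]
        simp only [if_neg hm]
        simp [hm]

/-- B's inner where-building loop, contains view. -/
theorem lem_innB_contains (j : Int) :
    ∀ (g : List String) (w : PySem.Dict String (List Int)) (m : String),
      (g.foldl (fun w mol =>
          if (w.getD mol []).contains (j + 1) then w
          else w.insert mol (w.getD mol [] ++ [j + 1])) w).contains m
        = (w.contains m || decide (m ∈ g)) := by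
  intro g
  induction g with
  | nil => intro w m; simp
  | cons mol rest ih =>
    intro w m
    by_cases hc : (w.getD mol []).contains (j + 1)
    · have hmol : w.contains mol = true := by
        by_contra h
        rw [PySem.Dict.getD_of_not_contains w [] (by simpa using h)] at hc
        simp at hc
      simp only [List.foldl_cons, if_pos hc, ih]
      by_cases hm : m = mol
      · subst hm; simp [hmol]
      · simp [hm]
    · simp only [List.foldl_cons, if_neg hc, ih]
      rw [PySem.Dict.contains_insert]
      by_cases hm : m = mol
      · subst hm; simp
      · have h1 : (m == mol) = false := by simp [hm]
        simp [h1, List.mem_cons, hm]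

/-- B's outer where-building loop, getD view. -/
theorem lem_outB_getD :
    ∀ (gs : List (List String)) (s : Int) (w : PySem.Dict String (List Int)) (m : String),
      (∀ x ∈ w.getD m [], x < s + 1) →
      ((PySem.List.enumerate gs s).foldl (fun w p =>
          p.2.foldl (fun w mol =>
            if (w.getD mol []).contains (p.1 + 1) then w
            else w.insert mol (w.getD mol [] ++ [p.1 + 1])) w) w).getD m []
        = w.getD m [] ++
            ((PySem.List.enumerate gs s).filter (fun p => p.2.contains m)).map (fun p => p.1 + 1) := by
  intro gs
  induction gs with
  | nil => intro s w m _; simp [PySem.List.enumerate]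
  | cons g rest ih =>
    intro s w m hbound
    rw [PySem.List.enumerate_cons]
    simp only [List.foldl_cons, List.filter_cons]
    have hstep := lem_innB_getD s g w m
    have hnotin : (s + 1) ∉ w.getD m [] := fun h => absurd (hbound _ h) (by omega)
    have hstep' : (g.foldl (fun w mol =>
        if (w.getD mol []).contains (s + 1) then w
        else w.insert mol (w.getD mol [] ++ [s + 1])) w).getD m []
        = w.getD m [] ++ (if g.contains m then [s + 1] else []) := by
      rw [hstep]
      by_cases hm : m ∈ g
      · simp [hm, hnotin]
      · simp [hm]
    rw [ih (s + 1) _ m]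
    · rw [hstep']
      by_cases hm : g.contains m
      · simp only [hm, if_pos rfl]
        simp
      · simp only [hm]
        simp
    · intro x hx
      rw [hstep'] at hx
      rcases List.mem_append.mp hx with h | h
      · have := hbound x h; omega
      · rcases (by split at h <;> simp_all : x = s + 1); omega

/-- B's outer where-building loop, contains view. -/
theorem lem_outB_contains :
    ∀ (gs : List (List String)) (s : Int) (w : PySem.Dict String (List Int)) (m : String),
      ((PySem.List.enumerate gs s).foldl (fun w p =>
          p.2.foldl (fun w mol =>
            if (w.getD mol []).contains (p.1 + 1) then w
            else w.insert mol (w.getD mol [] ++ [p.1 + 1])) w) w).contains m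
        = (w.contains m || decide (m ∈ gs.flatten)) := by
  intro gs
  induction gs with
  | nil => intro s w m; simp [PySem.List.enumerate]
  | cons g rest ih =>
    intro s w m
    rw [PySem.List.enumerate_cons]
    simp only [List.foldl_cons]
    rw [ih (s + 1), lem_innB_contains s g w m]
    by_cases h1 : m ∈ g <;> by_cases h2 : m ∈ rest.flatten <;>
      simp [h1, h2, List.flatten_cons, List.mem_append]

theorem lem_W_nodup (gs : List (List String)) (m : String) : (pvW gs m).Nodup := by
  unfold pvW
  have h1 := (PySem.List.pairwise_lt_enumerate gs 0).filter (fun p => p.2.contains m)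
  have h2 : (((PySem.List.enumerate gs 0).filter (fun p => p.2.contains m)).map
      (fun p => p.1 + 1)).Pairwise (· < ·) := List.pairwise_map.mpr (h1.imp (by intro a b h; omega))
  exact h2.imp (fun h => ne_of_lt h)

/-- At an index of the enumeration, membership of `i+1` in `pvW` is membership of `m` in that group. -/
theorem lem_W_at (gs : List (List String)) (m : String) {p : Int × List String}
    (hp : p ∈ PySem.List.enumerate gs 0) :
    (pvW gs m).contains (p.1 + 1) = p.2.contains m := by
  unfold pvW
  by_cases hm : p.2.contains m
  · rw [hm]
    have hmm : (p.1 + 1) ∈ ((PySem.List.enumerate gs 0).filter (fun p => p.2.contains m)).map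
        (fun p => p.1 + 1) := List.mem_map.mpr ⟨p, List.mem_filter.mpr ⟨hp, hm⟩, rfl⟩
    simpa using hmm
  · rw [show p.2.contains m = false from by simpa using hm]
    have hnm : (p.1 + 1) ∉ ((PySem.List.enumerate gs 0).filter (fun p => p.2.contains m)).map
        (fun p => p.1 + 1) := by
      intro h
      rcases List.mem_map.mp h with ⟨q, hq, hq1⟩
      rcases List.mem_filter.mp hq with ⟨hqmem, hqc⟩
      rcases (PySem.List.mem_enumerate_iff gs 0 p).mp hp with ⟨k, hk, hpk⟩
      rcases (PySem.List.mem_enumerate_iff gs 0 q).mp hqmem with ⟨k', hk', hqk⟩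
      have hkk : k' = k := by
        have e1 : p.1 = (k : Int) := by rw [hpk]; simp
        have e2 : q.1 = (k' : Int) := by rw [hqk]; simp
        omega
      subst hkk
      have hqp : q = p := by rw [hpk, hqk]
      rw [hqp] at hqc
      exact absurd hqc hm
    simpa using hnm

-- ---- dispatch loop (B) ----

theorem lem_disp_inner (mol : String) (c : Int) :
    ∀ (ids : List Int) (d : PySem.Dict Int (List String)),
      (ids.foldl (fun d idx => d.modify idx [] (fun l => l ++ [mol])) d).getD c []
        = d.getD c [] ++ List.replicate (ids.count c) mol := by
  intro ids
  induction ids with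
  | nil => intro d; simp
  | cons idx rest ih =>
    intro d
    simp only [List.foldl_cons, ih]
    rw [PySem.Dict.getD_modify]
    by_cases hc : c = idx
    · subst hc
      rw [if_pos rfl, List.count_cons_self]
      simp [List.replicate_succ, List.append_assoc]
    · rw [if_neg hc, List.count_cons_of_ne (Ne.symm hc)]

theorem lem_disp_inner_keys (mol : String) :
    ∀ (ids : List Int) (d : PySem.Dict Int (List String)),
      (∀ idx ∈ ids, idx ∈ d.keys) →
      (ids.foldl (fun d idx => d.modify idx [] (fun l => l ++ [mol])) d).keys = d.keys := by
  intro ids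
  induction ids with
  | nil => intro d _; simp
  | cons idx rest ih =>
    intro d hmem
    simp only [List.foldl_cons]
    have hct : d.contains idx = true :=
      (PySem.Dict.contains_iff_mem_keys d idx).mpr (hmem idx (by simp))
    have hkeys : (d.modify idx [] (fun l => l ++ [mol])).keys = d.keys := by
      rw [PySem.Dict.keys_modify, PySem.Dict.keys_insert_of_contains _ _ hct]
    rw [ih _ (fun i hi => by rw [hkeys]; exact hmem i (by simp [hi]))]
    exact hkeys

theorem lem_disp_getD (Wf : String → List Int) (hW : ∀ mol, (Wf mol).Nodup) (c : Int) :
    ∀ (tk : List String) (d : PySem.Dict Int (List String)),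
      (tk.foldl (fun d mol =>
          (Wf mol).foldl (fun d idx => d.modify idx [] (fun l => l ++ [mol])) d) d).getD c []
        = d.getD c [] ++ tk.filter (fun mol => (Wf mol).contains c) := by
  intro tk
  induction tk with
  | nil => intro d; simp
  | cons mol rest ih =>
    intro d
    simp only [List.foldl_cons, List.filter_cons, ih]
    rw [lem_disp_inner mol c (Wf mol) d]
    by_cases hc : c ∈ Wf mol
    · have h1 : (Wf mol).count c = 1 := List.count_eq_one_of_mem (hW mol) hc
      simp [h1, hc]
    · have h0 : (Wf mol).count c = 0 := List.count_eq_zero.mpr hc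
      simp [h0, hc]

theorem lem_disp_keys (Wf : String → List Int) :
    ∀ (tk : List String) (d : PySem.Dict Int (List String)),
      (∀ mol ∈ tk, ∀ idx ∈ Wf mol, idx ∈ d.keys) →
      (tk.foldl (fun d mol =>
          (Wf mol).foldl (fun d idx => d.modify idx [] (fun l => l ++ [mol])) d) d).keys = d.keys := by
  intro tk
  induction tk with
  | nil => intro d _; simp
  | cons mol rest ih =>
    intro d hmem
    simp only [List.foldl_cons]
    have hk : ((Wf mol).foldl (fun d idx => d.modify idx [] (fun l => l ++ [mol])) d).keys
        = d.keys := lem_disp_inner_keys mol (Wf mol) d (hmem mol (by simp))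
    rw [ih _ (fun m hm i hi => by rw [hk]; exact hmem m (by simp [hm]) i hi)]
    exact hk

-- ---- tkg (B's pre-initialized dict) ----

theorem lem_tkg_keys (n : Int) :
    ((PySem.List.pyRange 0 n 1).foldl
        (fun d i => d.insert (i + 1) ([] : List String)) PySem.Dict.empty).keys
      = (PySem.List.pyRange 0 n 1).map (fun i => i + 1) := by
  rw [PySem.Dict.keys_foldl_insert_key (PySem.List.pyRange 0 n 1) (fun i => i + 1)
    (fun _ _ => ([] : List String)) PySem.Dict.empty]
  rw [PySem.Dict.keys_empty]
  show PySem.Set.update PySem.Set.empty _ = _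
  rw [PySem.Set.update_empty]
  exact PySem.Set.ofList_eq_self_of_nodup _
    ((PySem.List.nodup_pyRange_one 0 n).map (fun a b h => by omega))

theorem lem_tkg_getD (n : Int) (c : Int) :
    ((PySem.List.pyRange 0 n 1).foldl
        (fun d i => d.insert (i + 1) ([] : List String)) PySem.Dict.empty).getD c [] = [] := by
  have : ∀ (l : List Int) (d : PySem.Dict Int (List String)), (∀ x, d.getD x [] = []) →
      (l.foldl (fun d i => d.insert (i + 1) ([] : List String)) d).getD c [] = [] := by
    intro l
    induction l with
    | nil => intro d h; exact h c
    | cons i rest ih =>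
      intro d h
      simp only [List.foldl_cons]
      refine ih _ (fun x => ?_)
      rw [PySem.Dict.getD_insert]
      split <;> simp [h]
  exact this _ _ (fun x => PySem.Dict.getD_empty x [])

-- ---- A's result loop ----

theorem lem_innA_getD (tk : List String) (cnd : String → Bool) (key c : Int) :
    ∀ (d : PySem.Dict Int (List String)),
      (tk.foldl (fun d mol =>
          if cnd mol then d.modify key [] (fun l => l ++ [mol]) else d) d).getD c []
        = if c = key then d.getD key [] ++ tk.filter cnd else d.getD c [] := by
  induction tk with
  | nil => intro d; by_cases hc : c = key <;> simp [hc]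
  | cons mol rest ih =>
    intro d
    simp only [List.foldl_cons, List.filter_cons]
    by_cases hp : cnd mol
    · rw [if_pos hp, ih]
      simp only [PySem.Dict.getD_modify]
      by_cases hc : c = key
      · subst hc; simp [hp]
      · simp [hc, hp]
    · rw [if_neg hp, ih]
      simp [hp]

theorem lem_innA_keys (tk : List String) (cnd : String → Bool) (key : Int) :
    ∀ (d : PySem.Dict Int (List String)), key ∈ d.keys →
      (tk.foldl (fun d mol =>
          if cnd mol then d.modify key [] (fun l => l ++ [mol]) else d) d).keys = d.keys := by
  induction tk with
  | nil => intro d _; simp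
  | cons mol rest ih =>
    intro d hkey
    simp only [List.foldl_cons]
    by_cases hp : cnd mol
    · rw [if_pos hp]
      have hct : d.contains key = true := (PySem.Dict.contains_iff_mem_keys d key).mpr hkey
      have hkeys : (d.modify key [] (fun l => l ++ [mol])).keys = d.keys := by
        rw [PySem.Dict.keys_modify, PySem.Dict.keys_insert_of_contains _ _ hct]
      rw [ih _ (by rw [hkeys]; exact hkey)]
      exact hkeys
    · rw [if_neg hp]
      exact ih d hkey

theorem lem_outA (top_k : List String) :
    ∀ (gs : List (List String)) (s : Int) (d : PySem.Dict Int (List String)),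
      (∀ x ∈ d.keys, x < s + 1) →
      (((PySem.List.enumerate gs s).foldl (fun d p =>
          top_k.foldl (fun d mol =>
            if p.2.contains mol then d.modify (p.1 + 1) [] (fun l => l ++ [mol]) else d)
            (d.insert (p.1 + 1) ([] : List String))) d).keys
          = d.keys ++ (PySem.List.enumerate gs s).map (fun p => p.1 + 1))
      ∧ ∀ c : Int,
        ((PySem.List.enumerate gs s).foldl (fun d p =>
          top_k.foldl (fun d mol =>
            if p.2.contains mol then d.modify (p.1 + 1) [] (fun l => l ++ [mol]) else d)
            (d.insert (p.1 + 1) ([] : List String))) d).getD c []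
          = match (PySem.List.enumerate gs s).find? (fun p => p.1 + 1 == c) with
            | some p => top_k.filter (fun mol => p.2.contains mol)
            | none => d.getD c [] := by
  intro gs
  induction gs with
  | nil =>
    intro s d h
    refine ⟨by simp [PySem.List.enumerate], fun c => by simp [PySem.List.enumerate]⟩
  | cons g rest ih =>
    intro s d hb
    rw [PySem.List.enumerate_cons]
    simp only [List.foldl_cons, List.map_cons, List.find?_cons]
    have hfresh : d.contains (s + 1) = false := by
      by_contra h
      have hx := hb (s + 1) ((PySem.Dict.contains_iff_mem_keys d (s + 1)).mp (by simpa using h))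
      omega
    have hk1 : (d.insert (s + 1) ([] : List String)).keys = d.keys ++ [s + 1] :=
      PySem.Dict.keys_insert_of_not_contains d _ hfresh
    set d2 := top_k.foldl (fun d mol =>
        if g.contains mol then d.modify (s + 1) [] (fun l => l ++ [mol]) else d)
      (d.insert (s + 1) ([] : List String)) with hd2
    have hk2 : d2.keys = d.keys ++ [s + 1] := by
      rw [hd2, lem_innA_keys top_k (fun mol => g.contains mol) (s + 1) _ (by rw [hk1]; simp)]
      exact hk1
    have hg2 : ∀ c : Int, d2.getD c []
        = if c = s + 1 then top_k.filter (fun mol => g.contains mol) else d.getD c [] := by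
      intro c
      rw [hd2, lem_innA_getD]
      by_cases hc : c = s + 1
      · subst hc
        rw [if_pos rfl, if_pos rfl, PySem.Dict.getD_insert, if_pos rfl]
        exact List.nil_append _
      · rw [if_neg hc, if_neg hc, PySem.Dict.getD_insert]
        simp [hc]
    have hb2 : ∀ x ∈ d2.keys, x < (s + 1) + 1 := by
      rw [hk2]
      intro x hx
      rcases List.mem_append.mp hx with h | h
      · have := hb x h; omega
      · simp at h; omega
    obtain ⟨ihk, ihg⟩ := ih (s + 1) d2 hb2
    constructor
    · rw [ihk, hk2]
      simp [List.append_assoc]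
    · intro c
      rw [ihg c]
      cases hc : (s + 1 == c) with
      | true =>
        simp only [hc]
        have hceq : c = s + 1 := by simpa using (beq_iff_eq.mp hc).symm
        have hnone : (PySem.List.enumerate rest (s + 1)).find? (fun p => p.1 + 1 == c) = none := by
          rw [List.find?_eq_none]
          intro p hp
          rcases (PySem.List.mem_enumerate_iff rest (s + 1) p).mp hp with ⟨k, hk, hpk⟩
          have : p.1 = s + 1 + (k : Int) := by rw [hpk]
          simp only [beq_iff_eq]
          omega
        rw [hnone, hg2 c, if_pos hceq]
      | false =>
        simp only [hc]
        cases hfind : (PySem.List.enumerate rest (s + 1)).find? (fun p => p.1 + 1 == c) with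
        | some p => rfl
        | none =>
          show d2.getD c [] = d.getD c []
          rw [hg2 c, if_neg (by intro h; rw [h] at hc; simp at hc)]

/-- First components are injective on an enumeration. -/
theorem lem_enum_inj {gs : List (List String)} {p q : Int × List String}
    (hp : p ∈ PySem.List.enumerate gs 0) (hq : q ∈ PySem.List.enumerate gs 0)
    (h : p.1 = q.1) : p = q := by
  rcases (PySem.List.mem_enumerate_iff gs 0 p).mp hp with ⟨a, ha, hpa⟩
  rcases (PySem.List.mem_enumerate_iff gs 0 q).mp hq with ⟨b, hb, hqb⟩
  have hab : a = b := by
    have e1 : p.1 = (a : Int) := by rw [hpa]; simp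
    have e2 : q.1 = (b : Int) := by rw [hqb]; simp
    omega
  subst hab
  rw [hpa, hqb]

theorem lem_main (ranking : List (String × Int)) (exp_groups : List (List String)) (k : Int) :
    get_mol_per_group_in_top_k ranking exp_groups k
      = get_mol_per_group_in_top_k_alt ranking exp_groups k := by
  unfold get_mol_per_group_in_top_k get_mol_per_group_in_top_k_alt
  simp only []
  set whereD := List.foldl (fun w p =>
      List.foldl (fun w mol =>
        if (w.getD mol []).contains (p.1 + 1) = true then w
        else w.insert mol (w.getD mol [] ++ [p.1 + 1])) w p.2)
    PySem.Dict.empty (PySem.List.enumerate exp_groups 0) with hwD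
  have hWgetD : ∀ m, whereD.getD m [] = pvW exp_groups m := by
    intro m
    rw [hwD, lem_outB_getD exp_groups 0 PySem.Dict.empty m (by simp)]
    simp [pvW]
  have hWcont : ∀ m, whereD.contains m = exp_groups.flatten.contains m := by
    intro m
    rw [hwD, lem_outB_contains exp_groups 0 PySem.Dict.empty m]
    simp
  have hkeys2 : (List.foldl (fun d mol =>
        if exp_groups.flatten.contains mol = true
        then d.insert mol ((PySem.Dict.ofList ranking).getD mol 0) else d)
      PySem.Dict.empty (PySem.Dict.ofList ranking).keys).keys
      = List.filter (fun mol => exp_groups.flatten.contains mol)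
          (PySem.Dict.ofList ranking).keys := by
    rw [lem_cond_insert_keys (fun mol => exp_groups.flatten.contains mol)
      (fun mol => (PySem.Dict.ofList ranking).getD mol 0)
      (PySem.Dict.ofList ranking).keys PySem.Dict.empty
      (PySem.Dict.nodup_keys_ofList ranking) (fun m _ => PySem.Dict.contains_empty m)]
    rw [PySem.Dict.keys_empty, List.nil_append]
  have htk : List.filter (fun mol => whereD.contains mol) (PySem.Dict.ofList ranking).keys
      = (List.foldl (fun d mol =>
        if exp_groups.flatten.contains mol = true
        then d.insert mol ((PySem.Dict.ofList ranking).getD mol 0) else d)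
      PySem.Dict.empty (PySem.Dict.ofList ranking).keys).keys := by
    rw [hkeys2]
    apply List.filter_congr
    intro mol _
    rw [hWcont mol]
  rw [← htk]
  set tk := PySem.List.slice
      (List.filter (fun mol => whereD.contains mol) (PySem.Dict.ofList ranking).keys)
      none (some k) with htkdef
  obtain ⟨hkA, hgA⟩ := lem_outA tk exp_groups 0 PySem.Dict.empty (by simp)
  set resA := List.foldl (fun d p =>
      List.foldl (fun d mol =>
        if p.2.contains mol = true then d.modify (p.1 + 1) [] fun l => l ++ [mol] else d)
        (d.insert (p.1 + 1) []) tk)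
    PySem.Dict.empty (PySem.List.enumerate exp_groups 0) with hresA
  set tkg := List.foldl (fun d i => d.insert (i + 1) ([] : List String))
    PySem.Dict.empty (PySem.List.pyRange 0 (exp_groups.length : Int) 1) with htkg
  set resB := List.foldl (fun d mol =>
      List.foldl (fun d idx => d.modify idx [] fun l => l ++ [mol]) d (whereD.getD mol []))
    tkg tk with hresB
  have hWnodup : ∀ mol, (whereD.getD mol []).Nodup := fun mol =>
    (hWgetD mol) ▸ lem_W_nodup exp_groups mol
  set L := (PySem.List.pyRange 0 (exp_groups.length : Int) 1).map (fun i => i + 1) with hL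
  have hmapEq : (PySem.List.enumerate exp_groups 0).map (fun p => p.1 + 1) = L := by
    rw [hL]
    have h1 := PySem.List.map_fst_enumerate exp_groups 0
    calc (PySem.List.enumerate exp_groups 0).map (fun p => p.1 + 1)
        = ((PySem.List.enumerate exp_groups 0).map (fun p => p.1)).map (fun i => i + 1) := by
          rw [List.map_map]; rfl
      _ = _ := by rw [h1]; norm_num
  have hnodL : L.Nodup := (PySem.List.nodup_pyRange_one 0 _).map (fun a b h => by omega)
  have hkAkeys : resA.keys = L := by
    rw [hresA, hkA, PySem.Dict.keys_empty, List.nil_append, hmapEq]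
  have hWrange : ∀ (mol : String), ∀ idx ∈ whereD.getD mol [], idx ∈ L := by
    intro mol idx hidx
    rw [hWgetD mol] at hidx
    unfold pvW at hidx
    rcases List.mem_map.mp hidx with ⟨p, hpf, rfl⟩
    rcases List.mem_filter.mp hpf with ⟨hpm, _⟩
    rcases (PySem.List.mem_enumerate_iff exp_groups 0 p).mp hpm with ⟨a, ha, hpa⟩
    refine List.mem_map.mpr ⟨p.1, ?_, rfl⟩
    rw [PySem.List.mem_pyRange_one]
    have hp1 : p.1 = (a : Int) := by rw [hpa]; simp
    omega
  have htkgkeys : tkg.keys = L := by rw [htkg, hL]; exact lem_tkg_keys _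
  have hkBkeys : resB.keys = L := by
    rw [hresB, lem_disp_keys (fun mol => whereD.getD mol []) tk tkg
      (fun mol _ idx hidx => by rw [htkgkeys]; exact hWrange mol idx hidx)]
    exact htkgkeys
  rw [PySem.Dict.items_eq_map_keys resA (hkAkeys ▸ hnodL) [],
      PySem.Dict.items_eq_map_keys resB (hkBkeys ▸ hnodL) [],
      hkAkeys, hkBkeys]
  apply List.map_congr_left
  intro c hc
  rw [← hmapEq] at hc
  rcases List.mem_map.mp hc with ⟨p, hp, rfl⟩
  have hgoal : resA.getD (p.1 + 1) [] = resB.getD (p.1 + 1) [] := by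
    -- A side
    have hfs : ((PySem.List.enumerate exp_groups 0).find? (fun q => q.1 + 1 == p.1 + 1)).isSome :=
      List.find?_isSome.mpr ⟨p, hp, by simp⟩
    obtain ⟨q, hq⟩ := Option.isSome_iff_exists.mp hfs
    have hqmem := List.mem_of_find?_eq_some hq
    have hqpred := List.find?_some hq
    have hqp : q = p := lem_enum_inj hqmem hp (by
      have : q.1 + 1 = p.1 + 1 := by simpa using hqpred
      omega)
    subst hqp
    have hA : resA.getD (q.1 + 1) [] = tk.filter (fun mol => q.2.contains mol) := by
      rw [hresA, hgA (q.1 + 1), hq]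
    -- B side
    have hB : resB.getD (q.1 + 1) []
        = tk.filter (fun mol => (whereD.getD mol []).contains (q.1 + 1)) := by
      rw [hresB, lem_disp_getD (fun mol => whereD.getD mol []) hWnodup (q.1 + 1) tk tkg]
      rw [htkg, lem_tkg_getD _ _, List.nil_append]
    rw [hA, hB]
    apply List.filter_congr
    intro mol _
    rw [hWgetD mol, lem_W_at exp_groups mol hqmem]
  rw [hgoal]


-- ===== VERDICT (by name: the statement is the Claim_ definition above) =====
theorem get_mol_per_group_in_top_k_spec : Claim_equal_get_mol_per_group_in_top_k := by
  intro ranking exp_groups k _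
  unfold Spec_get_mol_per_group_in_top_k
  exact lem_main ranking exp_groups k
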